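-- pv_equiv track=rewrite | github.com/prravda/solved-algorithm | programmers/87390/solution-0.py | solution
-- ===== SOURCE A (Python) =====
-- from typing import List, Tuple
--
-- def manipulator(matrix: List[List[int]], from_coord: Tuple[int, int], to_coord: Tuple[int, int], fill_with: int) -> List[List[int]]:
--   from_x, from_y = from_coord
--   to_x, to_y = to_coord
--
--   for i in range(from_x, to_x):
--     for j in range(from_y, to_y):
--       if (matrix[i][j] == 0):
--         matrix[i][j] = fill_with
--
--   return matrix
--
-- def pick_rows(matrix: List[List[int]]) -> List[int]:
--   merged: List[int] = []
--
--   for i in range(len(matrix)):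
--     merged.extend(matrix[i])
--
--   return merged
--
-- def solution(n: int, left: int, right: int) -> List[int]:
--   # 0. create 2-dimension for init
--   init_matrix = [[0 for _ in range(n)] for _ in range(n)]
--
--   # 1. fill the matrix
--   from_coord = (0, 0)
--   modified_matrix = init_matrix
--
--   for i in range(1, n+1):
--     modified_matrix = manipulator(init_matrix, from_coord, (i, i), i)
--
--   # 2. then pick each row and merge them into a singluar list
--   merged_list = pick_rows(modified_matrix)
--
--   # 3. return by indices(left, left+1, right) into a singular list
--   return merged_list[left:right+1]
-- ===== SOURCE B (Python) =====
-- def solution(n, left, right):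
--     # Each cell (r, c) of the matrix holds max(r, c) + 1, so build the
--     # flattened matrix directly and slice out the requested window.
--     flat = [max(r, c) + 1 for r in range(n) for c in range(n)]
--     return flat[left:right + 1]
-- ===== Notes on version B (the rewrite author's own statement) =====
-- stated objective: faster
-- what changed: B replaces the n passes of zero-filling an n x n matrix with a single comprehension building each cell directly as max(r, c) + 1, then slices natively.
import Mathlib
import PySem

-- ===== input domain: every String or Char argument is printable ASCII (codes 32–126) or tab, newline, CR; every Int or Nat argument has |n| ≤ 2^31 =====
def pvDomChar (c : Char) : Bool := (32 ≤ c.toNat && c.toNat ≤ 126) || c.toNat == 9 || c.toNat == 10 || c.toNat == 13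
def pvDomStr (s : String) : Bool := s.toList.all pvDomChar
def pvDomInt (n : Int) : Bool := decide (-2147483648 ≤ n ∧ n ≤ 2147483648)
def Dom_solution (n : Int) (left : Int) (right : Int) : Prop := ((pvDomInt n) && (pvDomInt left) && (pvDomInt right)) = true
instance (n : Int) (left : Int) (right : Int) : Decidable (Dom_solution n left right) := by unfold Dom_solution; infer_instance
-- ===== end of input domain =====

-- B builds the flattened matrix directly, cell (r,c) = max r c + 1, instead of A's n
-- passes of zero-filling a mutable n×n matrix; then slices the requested window.
-- (Python A mutates its local matrix only; no caller-visible side effects.)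

-- ===== PORT A =====
def manipulator (matrix : List (List Int)) (from_coord : Int × Int) (to_coord : Int × Int) (fill_with : Int) : List (List Int) :=
  (PySem.List.pyRange from_coord.1 to_coord.1 1).foldl (fun m i =>
    (PySem.List.pyRange from_coord.2 to_coord.2 1).foldl (fun m j =>
      if PySem.List.pyGetD (PySem.List.pyGetD m i []) j 0 = 0 then
        PySem.List.pySetD m i (PySem.List.pySetD (PySem.List.pyGetD m i []) j fill_with)
      else m) m) matrix

def pick_rows (matrix : List (List Int)) : List Int :=
  (PySem.List.pyRange 0 (matrix.length : Int) 1).foldl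
    (fun merged i => merged ++ PySem.List.pyGetD matrix i []) []

def solution (n : Int) (left : Int) (right : Int) : List Int :=
  let init_matrix := (PySem.List.pyRange 0 n 1).map (fun _ => (PySem.List.pyRange 0 n 1).map (fun _ => (0 : Int)))
  let modified_matrix := (PySem.List.pyRange 1 (n+1) 1).foldl
      (fun mat i => manipulator mat (0, 0) (i, i) i) init_matrix
  let merged_list := pick_rows modified_matrix
  PySem.List.slice merged_list (some left) (some (right + 1))

-- ===== PORT B =====
def solution_alt (n : Int) (left : Int) (right : Int) : List Int :=
  let flat := (PySem.List.pyRange 0 n 1).flatMap (fun r =>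
    (PySem.List.pyRange 0 n 1).map (fun c => max r c + 1))
  PySem.List.slice flat (some left) (some (right + 1))

-- ===== PRECONDITION & SPEC =====
def Spec_solution (n : Int) (left : Int) (right : Int) (out : List Int) : Prop := out = solution_alt n left right
instance (n : Int) (left : Int) (right : Int) (out : List Int) : Decidable (Spec_solution n left right out) := by unfold Spec_solution; infer_instance

-- ===== CLAIM (what is proved, stated in full; the proofs are below) =====
def Claim_equal_solution : Prop := ∀ (n : Int) (left : Int) (right : Int), Dom_solution n left right → Spec_solution n left right (solution n left right)

-- ===== LEMMAS AND PROOFS =====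

/-- matrix entry after the fill loops `1..s` have run: `max r c + 1` inside the `s×s` corner, else `0`. -/
def pvEntry (s r c : Nat) : Int := if r < s ∧ c < s then ((max r c : Nat) : Int) + 1 else 0

/-- the whole `N×N` matrix after fill loops `1..s`. -/
def pvTgt (N s : Nat) : List (List Int) :=
  (List.range N).map (fun r => (List.range N).map (fun c => pvEntry s r c))

theorem pv_foldl_append (l : List (List Int)) (init : List Int) :
    l.foldl (· ++ ·) init = init ++ l.flatten := by
  induction l generalizing init with
  | nil => simp
  | cons a t ih => simp [List.foldl_cons, ih]

theorem pv_mapIdx_map_range (f : Nat → Int → Int) (h : Nat → Int) (N : Nat) :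
    ((List.range N).map h).mapIdx f = (List.range N).map (fun c => f c (h c)) := by
  apply List.ext_getElem
  · simp
  · intro i h1 h2
    simp [List.getElem_mapIdx]

theorem pv_set_map_range (N t : Nat) (ht : t < N) (g : Nat → List Int) (v : List Int) :
    ((List.range N).map g).set t v = (List.range N).map (fun r => if r = t then v else g r) := by
  apply List.ext_getElem
  · simp
  · intro i h1 h2
    simp only [List.getElem_set, List.getElem_map, List.getElem_range]
    rcases eq_or_ne i t with he | he
    · subst he; rfl
    · rw [if_neg (fun h => he h.symm), if_neg he]

/-- the inner `for j` loop only rewrites row `i`. -/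
theorem pv_inner_localize (v : Int) (js : List Int) (mat : List (List Int)) (i : Nat)
    (h : i < mat.length) :
    js.foldl (fun m j => if PySem.List.pyGetD (PySem.List.pyGetD m (i : Int) []) j 0 = 0 then
        PySem.List.pySetD m (i : Int) (PySem.List.pySetD (PySem.List.pyGetD m (i : Int) []) j v)
      else m) mat
    = mat.set i (js.foldl (fun r j => if PySem.List.pyGetD r j 0 = 0 then
        PySem.List.pySetD r j v else r) mat[i]) := by
  induction js generalizing mat with
  | nil => simp [List.set_getElem_self]
  | cons j js ih =>
    have hg : PySem.List.pyGetD mat (i : Int) ([] : List Int) = mat[i] := by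
      simp [PySem.List.pyGetD_natCast, List.getD_eq_getElem?_getD, List.getElem?_eq_getElem h]
    simp only [List.foldl_cons, hg]
    by_cases hc : PySem.List.pyGetD mat[i] j 0 = 0
    · rw [if_pos hc, if_pos hc]
      have hset : PySem.List.pySetD mat (i : Int) (PySem.List.pySetD mat[i] j v)
          = mat.set i (PySem.List.pySetD mat[i] j v) := by
        simp [PySem.List.pySetD_natCast]
      rw [hset, ih (mat.set i (PySem.List.pySetD mat[i] j v)) (by simpa using h)]
      rw [List.getElem_set_self, List.set_set]
    · rw [if_neg hc, if_neg hc, ih mat h]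

/-- the inner row loop over `range(b)` fills the zeros among the first `b` entries. -/
theorem pv_row_fold (v : Int) (b : Nat) (row : List Int) :
    (PySem.List.pyRange 0 (b : Int) 1).foldl (fun r j => if PySem.List.pyGetD r j 0 = 0 then
        PySem.List.pySetD r j v else r) row
    = row.mapIdx (fun c x => if c < b ∧ x = 0 then v else x) := by
  induction b with
  | zero =>
    rw [PySem.List.pyRange_one_eq_nil (by omega)]
    apply List.ext_getElem <;> simp
  | succ b ih =>
    have hpr : PySem.List.pyRange 0 ((b : Int) + 1) 1
        = PySem.List.pyRange 0 (b : Int) 1 ++ [(b : Int)] := by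
      exact PySem.List.pyRange_one_succ_right (by omega)
    push_cast
    rw [hpr, List.foldl_append, ih]
    simp only [List.foldl_cons, List.foldl_nil]
    by_cases hb : b < row.length
    · have hget : PySem.List.pyGetD (row.mapIdx fun c x => if c < b ∧ x = 0 then v else x) (b : Int) 0
          = row[b] := by
        simp [PySem.List.pyGetD_natCast, List.getD_eq_getElem?_getD,
          List.getElem?_eq_getElem (by simpa using hb)]
      rw [hget]
      by_cases hz : row[b] = 0
      · rw [if_pos hz]
        rw [PySem.List.pySetD_natCast]
        apply List.ext_getElem
        · simp
        · intro c h1 h2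
          simp only [List.getElem_set, List.getElem_mapIdx]
          by_cases hcb : c = b
          · subst hcb
            rw [if_pos rfl, if_pos ⟨by omega, hz⟩]
          · have hne : ¬ b = c := fun h => hcb h.symm
            simp only [if_neg hne]
            split_ifs with p q q <;> first | rfl | (exfalso; omega)
      · rw [if_neg hz]
        apply List.ext_getElem
        · simp
        · intro c h1 h2
          simp only [List.getElem_mapIdx]
          by_cases hcb : c = b
          · subst hcb
            have hA : ¬(c < c ∧ row[c] = 0) := fun h => absurd h.1 (by omega)
            have hB : ¬(c < c + 1 ∧ row[c] = 0) := fun h => hz h.2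
            rw [if_neg hA, if_neg hB]
          · split_ifs with p q q <;> first | rfl | (exfalso; omega)
    · have hget : PySem.List.pyGetD (row.mapIdx fun c x => if c < b ∧ x = 0 then v else x) (b : Int) 0
          = 0 := by
        simp [PySem.List.pyGetD_natCast, List.getD_eq_getElem?_getD,
          List.getElem?_eq_none (by simpa using hb)]
      rw [hget, if_pos rfl, PySem.List.pySetD_natCast, List.set_eq_of_length_le (by simpa using hb)]
      apply List.ext_getElem
      · simp
      · intro c h1 h2
        simp only [List.getElem_mapIdx]
        have : c < b := by simp at h1; omega
        split_ifs <;> first | rfl | (exfalso; omega)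

/-- filling row `r` of the stage-`s` matrix with `s+1` over the first `s+1` cells gives row `r` of stage `s+1`. -/
theorem pv_row_tgt (N s r : Nat) (hr : r ≤ s) :
    ((List.range N).map (fun c => pvEntry s r c)).mapIdx
        (fun c x => if c < s + 1 ∧ x = 0 then ((s + 1 : Nat) : Int) else x)
    = (List.range N).map (fun c => pvEntry (s + 1) r c) := by
  rw [pv_mapIdx_map_range]
  apply List.map_congr_left
  intro c _
  simp only [pvEntry]
  split_ifs <;> omega

theorem pv_outer (N s : Nat) (hs : s < N) (t : Nat) (ht : t ≤ s + 1) :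
    (PySem.List.pyRange 0 (t : Int) 1).foldl (fun m i =>
        (PySem.List.pyRange 0 ((s : Int) + 1) 1).foldl (fun m j =>
          if PySem.List.pyGetD (PySem.List.pyGetD m i []) j 0 = 0 then
            PySem.List.pySetD m i (PySem.List.pySetD (PySem.List.pyGetD m i []) j ((s : Int) + 1))
          else m) m) (pvTgt N s)
    = (List.range N).map (fun r => if r < t then (List.range N).map (fun c => pvEntry (s + 1) r c)
        else (List.range N).map (fun c => pvEntry s r c)) := by
  induction t with
  | zero =>
    rw [PySem.List.pyRange_one_eq_nil (a := (0 : Int)) (b := ((0 : Nat) : Int)) (by simp)]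
    simp only [List.foldl_nil, pvTgt]
    apply List.map_congr_left
    intro r _
    rw [if_neg (by omega)]
  | succ t ih =>
    have ht' : t ≤ s + 1 := by omega
    have htN : t < N := by omega
    have hpr : PySem.List.pyRange 0 ((t : Int) + 1) 1
        = PySem.List.pyRange 0 (t : Int) 1 ++ [(t : Int)] :=
      PySem.List.pyRange_one_succ_right (by omega)
    push_cast
    rw [hpr, List.foldl_append, ih ht']
    simp only [List.foldl_cons, List.foldl_nil]
    set matM := (List.range N).map (fun r => if r < t then (List.range N).map (fun c => pvEntry (s + 1) r c)
        else (List.range N).map (fun c => pvEntry s r c)) with hmatM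
    have hlen : t < matM.length := by
      simp only [hmatM, List.length_map, List.length_range]; exact htN
    rw [pv_inner_localize ((s : Int) + 1) _ matM t hlen]
    have hrowt : matM[t]'(hlen) = (List.range N).map (fun c => pvEntry s t c) := by
      simp [hmatM]
    rw [hrowt]
    have hcast : ((s : Int) + 1) = (((s + 1 : Nat) : Nat) : Int) := by push_cast; ring
    rw [hcast, pv_row_fold, pv_row_tgt N s t (by omega)]
    rw [pv_set_map_range N t htN]
    apply List.map_congr_left
    intro r _
    by_cases h1 : r = t
    · subst h1
      rw [if_pos rfl, if_pos (by omega)]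
    · rw [if_neg h1]
      by_cases h2 : r < t
      · rw [if_pos h2, if_pos (by omega)]
      · rw [if_neg h2, if_neg (by omega)]

theorem pv_manip_tgt (N s : Nat) (hs : s < N) :
    manipulator (pvTgt N s) (0, 0) ((s : Int) + 1, (s : Int) + 1) ((s : Int) + 1)
      = pvTgt N (s + 1) := by
  have h := pv_outer N s hs (s + 1) (le_refl _)
  push_cast at h
  have hx : (List.range N).map (fun r => if r < s + 1 then (List.range N).map (fun c => pvEntry (s + 1) r c)
        else (List.range N).map (fun c => pvEntry s r c)) = pvTgt N (s + 1) := by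
    unfold pvTgt
    apply List.map_congr_left
    intro r _
    by_cases h1 : r < s + 1
    · rw [if_pos h1]
    · rw [if_neg h1]
      apply List.map_congr_left
      intro c _
      simp only [pvEntry]
      split_ifs <;> first | rfl | (exfalso; omega)
  exact h.trans hx

theorem pv_main_aux (N : Nat) (s : Nat) (hsN : s ≤ N) :
    (PySem.List.pyRange 1 ((s : Int) + 1) 1).foldl
        (fun mat i => manipulator mat (0, 0) (i, i) i) (pvTgt N 0) = pvTgt N s := by
  induction s with
  | zero =>
    rw [PySem.List.pyRange_one_eq_nil (by omega)]
    rfl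
  | succ s ih =>
    have hpr : PySem.List.pyRange 1 (((s : Int) + 1) + 1) 1
        = PySem.List.pyRange 1 ((s : Int) + 1) 1 ++ [(s : Int) + 1] :=
      PySem.List.pyRange_one_succ_right (by omega)
    push_cast
    rw [hpr, List.foldl_append, ih (by omega)]
    simp only [List.foldl_cons, List.foldl_nil]
    exact pv_manip_tgt N s (by omega)

/-- A's merged list equals the stage-`N` grid flattened. -/
theorem pv_merged (n : Int) (hn : 0 < n) :
    pick_rows ((PySem.List.pyRange 1 (n + 1) 1).foldl (fun mat i => manipulator mat (0, 0) (i, i) i)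
      ((PySem.List.pyRange 0 n 1).map (fun _ => (PySem.List.pyRange 0 n 1).map (fun _ => (0 : Int)))))
    = ((List.range n.toNat).map (fun r => (List.range n.toNat).map (fun c => pvEntry n.toNat r c))).flatten := by
  set N := n.toNat with hNdef
  have hn' : n = (N : Int) := by omega
  have hinit : (PySem.List.pyRange 0 n 1).map (fun _ => (PySem.List.pyRange 0 n 1).map (fun _ => (0 : Int)))
      = pvTgt N 0 := by
    rw [List.map_const', List.map_const', PySem.List.length_pyRange_one]
    unfold pvTgt
    have hrow : (fun r => (List.range N).map (fun c => pvEntry 0 r c))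
        = (fun _ : Nat => List.replicate N (0 : Int)) := by
      funext r
      rw [show (fun c => pvEntry 0 r c) = (fun _ : Nat => (0 : Int)) from
        funext (fun c => by simp [pvEntry]), List.map_const', List.length_range]
    rw [hrow, List.map_const', List.length_range, show (n - 0).toNat = N by omega]
  rw [hinit, hn', pv_main_aux N N (le_refl _)]
  unfold pick_rows
  rw [PySem.List.foldl_pyRange_zero_pyGetD' (pvTgt N N) [] (fun acc row => acc ++ row) []]
  rw [pv_foldl_append, List.nil_append]
  rfl

/-- B's comprehension equals the same flattened grid. -/
theorem pv_flat (n : Int) (hn : 0 < n) :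
    (PySem.List.pyRange 0 n 1).flatMap (fun r => (PySem.List.pyRange 0 n 1).map (fun c => max r c + 1))
    = ((List.range n.toNat).map (fun r => (List.range n.toNat).map (fun c => pvEntry n.toNat r c))).flatten := by
  set N := n.toNat with hNdef
  have hn' : n = (N : Int) := by omega
  rw [hn', PySem.List.pyRange_zero_natCast, List.flatMap_def, List.map_map]
  congr 1
  apply List.map_congr_left
  intro r hr
  simp only [Function.comp_apply, List.map_map]
  apply List.map_congr_left
  intro c hc
  have hrN : r < N := List.mem_range.mp hr
  have hcN : c < N := List.mem_range.mp hc
  simp only [Function.comp_apply, pvEntry]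
  rw [if_pos ⟨hrN, hcN⟩]
  omega

theorem pv_merged_eq_flat (n : Int) :
    pick_rows ((PySem.List.pyRange 1 (n + 1) 1).foldl (fun mat i => manipulator mat (0, 0) (i, i) i)
      ((PySem.List.pyRange 0 n 1).map (fun _ => (PySem.List.pyRange 0 n 1).map (fun _ => (0 : Int)))))
    = (PySem.List.pyRange 0 n 1).flatMap (fun r => (PySem.List.pyRange 0 n 1).map (fun c => max r c + 1)) := by
  by_cases hn : 0 < n
  · rw [pv_merged n hn, pv_flat n hn]
  · rw [PySem.List.pyRange_one_eq_nil (by omega : n ≤ 0),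
      PySem.List.pyRange_one_eq_nil (by omega : n + 1 ≤ 1)]
    rfl

-- ===== VERDICT (by name: the statement is the Claim_ definition above) =====
theorem solution_spec : Claim_equal_solution := by
  intro n l r _
  show solution n l r = solution_alt n l r
  simp only [solution, solution_alt]
  rw [pv_merged_eq_flat n]
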